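-- pv_equiv track=rewrite | github.com/billymonks/nekketsu-nikki-eng | scripts/fix_alignment.py | get_position_for_slash
-- ===== SOURCE A (Python) =====
-- def get_position_for_slash(text: str, char_index: int) -> int:
--     """
--     Get byte position for / alignment.
--     Format codes count as their FULL character length (not 1 byte).
--     Resets on space or /.
--     """
--     segment_start = 0
--     for i in range(char_index):
--         if text[i] in ' /':
--             segment_start = i + 1
--
--     pos, i = 0, segment_start
--     while i < char_index and i < len(text):
--         # For / alignment, count all characters by their actual byte size
--         pos += 1 if ord(text[i]) < 128 else 2
--         i += 1
--     return pos
-- ===== SOURCE B (Python) =====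
-- def get_position_for_slash(text: str, char_index: int) -> int:
--     """Scan backwards from char_index-1, summing byte widths, stopping at the first space or slash."""
--     pos = 0
--     i = char_index - 1
--     while i >= 0:
--         c = text[i]
--         if c == ' ' or c == '/':
--             break
--         pos += 1 if ord(c) < 128 else 2
--         i -= 1
--     return pos
-- ===== Notes on version B (the rewrite author's own statement) =====
-- stated objective: alternative
-- what changed: Replaced A's two forward loops (find the last delimiter over the whole prefix, then sum byte widths of the suffix) by a single backward scan from char_index-1 that stops at the first space or slash, visiting only the last segment.
import Mathlib
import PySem

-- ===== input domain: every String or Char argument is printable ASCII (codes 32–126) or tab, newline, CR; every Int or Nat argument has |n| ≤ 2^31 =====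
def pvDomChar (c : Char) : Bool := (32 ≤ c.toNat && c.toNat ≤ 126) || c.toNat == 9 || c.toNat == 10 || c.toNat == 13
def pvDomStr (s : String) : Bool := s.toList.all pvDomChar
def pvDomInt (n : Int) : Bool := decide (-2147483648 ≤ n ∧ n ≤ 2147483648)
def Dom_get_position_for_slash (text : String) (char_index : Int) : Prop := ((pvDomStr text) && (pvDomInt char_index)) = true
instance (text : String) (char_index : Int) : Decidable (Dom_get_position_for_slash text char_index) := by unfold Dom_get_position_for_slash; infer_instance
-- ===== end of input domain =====

-- B replaces A's two forward loops by a single backward scan from char_index-1 that stops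
-- at the first ' ' or '/', visiting only the last segment (objective: alternative).

-- ===== PORT A =====
-- first loop: segment_start = i+1 at each delimiter; second: while i < char_index and i < len(text),
-- rendered as a fold over range(segment_start, min(char_index, len(text))) since i only steps by 1.
def get_position_for_slash (text : String) (char_index : Int) : Int :=
  let segment_start : Int :=
    (PySem.List.pyRange 0 char_index 1).foldl
      (fun s i =>
        let c := (PySem.Str.pyGet? text i).getD ' '   -- out-of-range excluded by Pre_ (IndexError)
        if c = ' ' ∨ c = '/' then i + 1 else s) 0
  (PySem.List.pyRange segment_start (min char_index (PySem.Str.len text)) 1).foldl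
    (fun pos i =>
      let c := (PySem.Str.pyGet? text i).getD ' '
      pos + (if c.toNat < 128 then 1 else 2)) 0

-- ===== PORT B =====
-- Source B's while loop 'i = char_index-1; while i >= 0: …; i -= 1' as structural recursion:
-- fuel n stands for i = n-1 (n = 0 means i < 0, the loop has ended); char_index.toNat
-- renders the loop-entry test (negative char_index never enters the loop).
def pvAltLoop (text : String) : Nat → Int → Int
  | 0, pos => pos
  | n + 1, pos =>
      let c := (PySem.Str.pyGet? text (n : Int)).getD ' '   -- out-of-range excluded by Pre_ (IndexError)
      if c = ' ' ∨ c = '/' then pos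
      else pvAltLoop text n (pos + (if c.toNat < 128 then 1 else 2))

def get_position_for_slash_alt (text : String) (char_index : Int) : Int :=
  pvAltLoop text char_index.toNat 0

-- ===== PRECONDITION & SPEC =====
-- A (and B) raise IndexError exactly when char_index > len(text): A reads text[i] for every i in range(char_index).
def Pre_get_position_for_slash (text : String) (char_index : Int) : Prop :=
  char_index ≤ PySem.Str.len text
instance (text : String) (char_index : Int) : Decidable (Pre_get_position_for_slash text char_index) := by
  unfold Pre_get_position_for_slash; infer_instance
def pvWitness_get_position_for_slash : String × Int := ("ab c/de", 6)

def Spec_get_position_for_slash (text : String) (char_index : Int) (out : Int) : Prop := out = get_position_for_slash_alt text char_index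
instance (text : String) (char_index : Int) (out : Int) : Decidable (Spec_get_position_for_slash text char_index out) := by unfold Spec_get_position_for_slash; infer_instance

-- ===== CLAIM (what is proved, stated in full; the proofs are below) =====
def Claim_equal_get_position_for_slash : Prop := ∀ (text : String) (char_index : Int), Dom_get_position_for_slash text char_index → Pre_get_position_for_slash text char_index → Spec_get_position_for_slash text char_index (get_position_for_slash text char_index)

-- ===== LEMMAS AND PROOFS =====

-- abbreviations for the two folds of port A (definitionally its pieces), used only by the proofs
def pvSeg (text : String) (m : Int) : Int :=
  (PySem.List.pyRange 0 m 1).foldl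
    (fun s i =>
      if (PySem.Str.pyGet? text i).getD ' ' = ' ' ∨ (PySem.Str.pyGet? text i).getD ' ' = '/'
      then i + 1 else s) 0

def pvSum (text : String) (a b : Int) : Int :=
  (PySem.List.pyRange a b 1).foldl
    (fun pos i =>
      pos + (if ((PySem.Str.pyGet? text i).getD ' ').toNat < 128 then 1 else 2)) 0

theorem pvSeg_succ (text : String) (k : Nat) :
    pvSeg text ((k : Int) + 1) =
      if (PySem.Str.pyGet? text (k : Int)).getD ' ' = ' ' ∨
         (PySem.Str.pyGet? text (k : Int)).getD ' ' = '/'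
      then (k : Int) + 1 else pvSeg text (k : Int) := by
  unfold pvSeg
  rw [PySem.List.pyRange_one_succ_right (by positivity), List.foldl_append]
  rfl

theorem pvSum_snoc (text : String) (a : Int) (k : Nat) (h : a ≤ (k : Int)) :
    pvSum text a ((k : Int) + 1) =
      pvSum text a (k : Int) +
        (if ((PySem.Str.pyGet? text (k : Int)).getD ' ').toNat < 128 then 1 else 2) := by
  unfold pvSum
  rw [PySem.List.pyRange_one_succ_right h, List.foldl_append]
  rfl

theorem pvSeg_bounds (text : String) (m : Nat) :
    0 ≤ pvSeg text (m : Int) ∧ pvSeg text (m : Int) ≤ (m : Int) := by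
  induction m with
  | zero => simp [pvSeg, PySem.List.pyRange_one_eq_nil]
  | succ k ih =>
    have hcast : ((k + 1 : Nat) : Int) = (k : Int) + 1 := by push_cast; ring
    rw [hcast, pvSeg_succ]
    split_ifs <;> omega

-- the backward loop with accumulator pos computes pos + (A's suffix sum after the last delimiter)
theorem pvAltLoop_eq (text : String) (m : Nat) (pos : Int) :
    pvAltLoop text m pos = pos + pvSum text (pvSeg text (m : Int)) (m : Int) := by
  induction m generalizing pos with
  | zero => simp [pvAltLoop, pvSum, pvSeg, PySem.List.pyRange_one_eq_nil]
  | succ k ih =>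
    have hcast : ((k + 1 : Nat) : Int) = (k : Int) + 1 := by push_cast; ring
    rw [hcast, pvSeg_succ]
    by_cases hd : (PySem.Str.pyGet? text (k : Int)).getD ' ' = ' ' ∨
                  (PySem.Str.pyGet? text (k : Int)).getD ' ' = '/'
    · rw [if_pos hd]
      have hz : pvSum text ((k : Int) + 1) ((k : Int) + 1) = 0 := by
        unfold pvSum; rw [PySem.List.pyRange_one_eq_nil (le_refl _)]; rfl
      rw [hz]
      show (if _ then pos else _) = pos + 0
      rw [if_pos hd]; ring
    · rw [if_neg hd, pvSum_snoc text _ k (pvSeg_bounds text k).2]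
      show (if _ then pos else pvAltLoop text k _) = _
      rw [if_neg hd, ih]; ring

-- ===== VERDICT (by name: the statement is the Claim_ definition above) =====
theorem get_position_for_slash_spec : Claim_equal_get_position_for_slash := by
  intro text ci _ hpre
  unfold Spec_get_position_for_slash
  unfold Pre_get_position_for_slash at hpre
  have hA : get_position_for_slash text ci = pvSum text (pvSeg text ci) (min ci (PySem.Str.len text)) := rfl
  have hB : get_position_for_slash_alt text ci = pvAltLoop text ci.toNat 0 := rfl
  rw [hA, hB, min_eq_left hpre]
  by_cases hneg : ci < 0
  · have h0 : pvSeg text ci = 0 := by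
      unfold pvSeg; rw [PySem.List.pyRange_one_eq_nil (le_of_lt hneg)]; rfl
    have ht : ci.toNat = 0 := Int.toNat_of_nonpos (le_of_lt hneg)
    rw [h0, ht]
    unfold pvSum
    rw [PySem.List.pyRange_one_eq_nil (le_of_lt hneg)]
    rfl
  · obtain ⟨m, hm⟩ : ∃ m : Nat, ci = (m : Int) :=
      ⟨ci.toNat, (Int.toNat_of_nonneg (not_lt.mp hneg)).symm⟩
    subst hm
    rw [pvAltLoop_eq, Int.toNat_natCast]
    ring
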